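-- pv_equiv track=rewrite | github.com/aleksandermagi-dev/Lumen.AIv2 | src/lumen/reasoning/planner.py | _design_subject
-- ===== SOURCE A (Python) =====
-- def _design_subject(prompt: str) -> str:
--     normalized = " ".join(str(prompt).strip().lower().split())
--     starters = (
--         "design me an ",
--         "design me a ",
--         "design me ",
--         "design an ",
--         "design a ",
--         "design ",
--         "build me an ",
--         "build me a ",
--         "build me ",
--         "build an ",
--         "build a ",
--         "build ",
--         "invent an ",
--         "invent a ",
--         "invent ",
--         "draft an ",
--         "draft a ",
--         "draft ",
--         "propose an ",
--         "propose a ",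
--         "propose ",
--         "sketch an ",
--         "sketch a ",
--         "sketch ",
--     )
--     for prefix in starters:
--         if normalized.startswith(prefix):
--             return normalized[len(prefix) :].strip(" .!?")
--     return normalized.strip(" .!?")
-- ===== SOURCE B (Python) =====
-- def _design_subject(prompt: str) -> str:
--     tokens = str(prompt).strip().lower().split()
--     i = 0
--     if len(tokens) > 1 and tokens[0] in ("design", "build", "invent", "draft", "propose", "sketch"):
--         i = 1
--         if tokens[0] in ("design", "build") and i + 1 < len(tokens) and tokens[i] == "me":
--             i += 1
--         if i + 1 < len(tokens) and tokens[i] in ("a", "an"):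
--             i += 1
--     return " ".join(tokens[i:]).strip(" .!?")
-- ===== Notes on version B (the rewrite author's own statement) =====
-- stated objective: simpler
-- what changed: A scans a hard-coded tuple of 24 prefix strings and does string startswith/slicing; B tokenizes the normalized prompt once and advances an index over the token list (verb, optional 'me' after design/build, optional article), so the 24-string table disappears.
import Mathlib
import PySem

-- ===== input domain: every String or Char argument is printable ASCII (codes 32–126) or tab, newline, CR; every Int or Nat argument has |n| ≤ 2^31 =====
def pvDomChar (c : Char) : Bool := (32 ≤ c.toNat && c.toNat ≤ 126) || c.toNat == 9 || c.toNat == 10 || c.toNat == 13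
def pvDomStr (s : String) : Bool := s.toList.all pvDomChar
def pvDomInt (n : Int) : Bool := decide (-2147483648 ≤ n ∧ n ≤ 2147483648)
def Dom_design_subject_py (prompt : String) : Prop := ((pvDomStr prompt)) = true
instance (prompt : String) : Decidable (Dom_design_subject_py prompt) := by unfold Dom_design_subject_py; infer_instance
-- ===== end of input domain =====

-- B replaces A's linear scan over 24 hard-coded prefix strings by a single pass over the
-- token list with an advancing index (verb, optional 'me', optional article); objective:
-- simpler/alternative decomposition, same exact return value.

-- ===== PORT A =====
-- the tuple `starters`, in A's order
def pyStarters : List (List Char) :=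
  ["design me an ".toList, "design me a ".toList, "design me ".toList, "design an ".toList,
   "design a ".toList, "design ".toList, "build me an ".toList, "build me a ".toList,
   "build me ".toList, "build an ".toList, "build a ".toList, "build ".toList,
   "invent an ".toList, "invent a ".toList, "invent ".toList, "draft an ".toList,
   "draft a ".toList, "draft ".toList, "propose an ".toList, "propose a ".toList,
   "propose ".toList, "sketch an ".toList, "sketch a ".toList, "sketch ".toList]

-- 'for prefix in starters: if normalized.startswith(prefix): return normalized[len(prefix):].strip(" .!?")'
def pyAGo : List (List Char) → List Char → List Char
  | [], n => PySem.Chars.stripChars n " .!?".toList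
  | p :: ps, n =>
      if PySem.Chars.startswith n p then
        PySem.Chars.stripChars (PySem.Chars.slice n (some (p.length : Int)) none) " .!?".toList
      else pyAGo ps n

def design_subject_py (prompt : String) : String :=
  let normalized :=
    PySem.Chars.join [' '] (PySem.Chars.split₀ (PySem.Chars.lower (PySem.Chars.strip prompt.toList)))
  String.ofList (pyAGo pyStarters normalized)

-- ===== PORT B =====
def pyVerbs : List (List Char) :=
  ["design".toList, "build".toList, "invent".toList, "draft".toList, "propose".toList, "sketch".toList]

-- B's index logic: i = 0; advance past verb, then optional 'me' (design/build), then optional article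
def pyBIndex (tokens : List (List Char)) : Nat :=
  if decide (1 < tokens.length) && pyVerbs.contains (tokens.getD 0 []) then
    let i := 1
    let i := if ["design".toList, "build".toList].contains (tokens.getD 0 [])
                && decide (i + 1 < tokens.length) && (tokens.getD i [] == "me".toList)
             then i + 1 else i
    let i := if decide (i + 1 < tokens.length)
                && ["a".toList, "an".toList].contains (tokens.getD i [])
             then i + 1 else i
    i
  else 0

def design_subject_py_alt (prompt : String) : String :=
  let tokens := PySem.Chars.split₀ (PySem.Chars.lower (PySem.Chars.strip prompt.toList))
  String.ofList (PySem.Chars.stripChars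
    (PySem.Chars.join [' '] (tokens.drop (pyBIndex tokens))) " .!?".toList)

-- ===== PRECONDITION & SPEC =====
def Spec_design_subject_py (prompt : String) (out : String) : Prop := out = design_subject_py_alt prompt
instance (prompt : String) (out : String) : Decidable (Spec_design_subject_py prompt out) := by unfold Spec_design_subject_py; infer_instance

-- ===== CLAIM (what is proved, stated in full; the proofs are below) =====
def Claim_equal_design_subject_py : Prop := ∀ (prompt : String), Dom_design_subject_py prompt → Spec_design_subject_py prompt (design_subject_py prompt)

-- ===== LEMMAS AND PROOFS =====

-- proof-side helpers
def artTails : List (List Char) := ["an ".toList, "a ".toList, ([] : List Char)]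
def meTails : List (List Char) := ["me an ".toList, "me a ".toList, "me ".toList] ++ artTails

def stepMe : List (List Char) → List (List Char)
  | r :: x :: xs => if r = "me".toList then x :: xs else r :: x :: xs
  | l => l

def stepArt : List (List Char) → List (List Char)
  | r :: x :: xs => if r = "a".toList ∨ r = "an".toList then x :: xs else r :: x :: xs
  | l => l

def bDrop : List (List Char) → List (List Char)
  | t :: r :: rest =>
      if t ∈ pyVerbs then
        (if t = "design".toList ∨ t = "build".toList then stepArt (stepMe (r :: rest))
         else stepArt (r :: rest))
      else t :: r :: rest
  | l => l

theorem starters_structure :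
    pyStarters =
      meTails.map (fun p => "design".toList ++ ' ' :: p) ++
      (meTails.map (fun p => "build".toList ++ ' ' :: p) ++
      (artTails.map (fun p => "invent".toList ++ ' ' :: p) ++
      (artTails.map (fun p => "draft".toList ++ ' ' :: p) ++
      (artTails.map (fun p => "propose".toList ++ ' ' :: p) ++
      (artTails.map (fun p => "sketch".toList ++ ' ' :: p) ++ []))))) := by decide

-- tokens of split₀ are nonempty and space-free
theorem go_tok : ∀ (s cur acc : _), ' ' ∉ cur → (∀ t ∈ acc, t ≠ [] ∧ ' ' ∉ t) →
    ∀ t ∈ PySem.Chars.split₀.go s cur acc, t ≠ [] ∧ ' ' ∉ t := by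
  intro s
  induction s with
  | nil =>
    intro cur acc hc ha t htm
    simp only [PySem.Chars.split₀.go] at htm
    split at htm
    · exact ha t (List.mem_reverse.mp htm)
    · rcases List.mem_cons.mp (List.mem_reverse.mp htm) with h | h
      · subst h
        exact ⟨by simpa using ‹¬cur.isEmpty = true›, by simpa using hc⟩
      · exact ha t h
  | cons c rest ih =>
    intro cur acc hc ha t htm
    simp only [PySem.Chars.split₀.go] at htm
    split at htm
    · split at htm
      · exact ih [] acc (by simp) ha t htm
      · refine ih [] (cur.reverse :: acc) (by simp) ?_ t htm
        intro u hu
        rcases List.mem_cons.mp hu with h | h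
        · subst h
          exact ⟨by simpa using ‹¬cur.isEmpty = true›, by simpa using hc⟩
        · exact ha u h
    · refine ih (c :: cur) acc ?_ ha t htm
      intro h
      rcases List.mem_cons.mp h with h | h
      · rename_i hsp _; rw [← h] at hsp; simp [PySem.Chars.isspace] at hsp
      · exact hc h

theorem split₀_tok (s : List Char) : ∀ t ∈ PySem.Chars.split₀ s, t ≠ [] ∧ ' ' ∉ t :=
  go_tok s [] [] (by simp) (by simp)

-- join facts
theorem j_single (t : List Char) : PySem.Chars.join [' '] [t] = t := by
  simp [PySem.Chars.join, List.intercalate]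

theorem j_cons {R : List (List Char)} (t : List Char) (hR : R ≠ []) :
    PySem.Chars.join [' '] (t :: R) = t ++ ' ' :: PySem.Chars.join [' '] R := by
  cases R with
  | nil => exact absurd rfl hR
  | cons r rs => simp [PySem.Chars.join, List.intercalate, List.intersperse]

theorem drop_word (w p x : List Char) :
    List.drop (w ++ ' ' :: p).length (w ++ ' ' :: x) = List.drop p.length x := by
  rw [List.drop_append]
  simp [List.length_append]

theorem drop_match (w p : List Char) {R : List (List Char)} (hR : R ≠ []) :
    List.drop (w ++ ' ' :: p).length (PySem.Chars.join [' '] (w :: R)) =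
      List.drop p.length (PySem.Chars.join [' '] R) := by
  rw [j_cons w hR]; exact drop_word w p _

-- prefix facts
theorem prefix_word {w t p q : List Char} (hw : ' ' ∉ w) (ht : ' ' ∉ t) :
    (w ++ ' ' :: p <+: t ++ ' ' :: q) ↔ (w = t ∧ p <+: q) := by
  induction w generalizing t with
  | nil =>
    cases t with
    | nil => simp
    | cons c t' =>
      simp only [List.nil_append, List.cons_append, List.cons_prefix_cons]
      constructor
      · rintro ⟨h, -⟩; exact absurd h.symm (by intro hc; exact ht (hc ▸ List.mem_cons_self ..))
      · rintro ⟨h, -⟩; exact absurd h (by simp)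
  | cons a w' ih =>
    cases t with
    | nil =>
      simp only [List.cons_append, List.nil_append, List.cons_prefix_cons]
      constructor
      · rintro ⟨h, -⟩; exact absurd h (by intro hc; exact hw (hc ▸ List.mem_cons_self ..))
      · rintro ⟨h, -⟩; exact absurd h (by simp)
    | cons c t' =>
      simp only [List.cons_append, List.cons_prefix_cons]
      rw [ih (fun h => hw (List.mem_cons_of_mem _ h)) (fun h => ht (List.mem_cons_of_mem _ h))]
      constructor
      · rintro ⟨h1, h2, h3⟩; exact ⟨by rw [h1, h2], h3⟩
      · rintro ⟨h1, h3⟩; injection h1 with h1a h1b; exact ⟨h1a, h1b, h3⟩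

theorem no_space_prefix {p t : List Char} (hp : ' ' ∈ p) (ht : ' ' ∉ t) : ¬ p <+: t :=
  fun h => ht (h.subset hp)

theorem sw_cons {w t p : List Char} {R : List (List Char)} (hw : ' ' ∉ w) (ht : ' ' ∉ t)
    (hR : R ≠ []) :
    (w ++ ' ' :: p <+: PySem.Chars.join [' '] (t :: R)) ↔
      (w = t ∧ p <+: PySem.Chars.join [' '] R) := by
  rw [j_cons t hR]; exact prefix_word hw ht

-- pyAGo stepping
theorem pyAGo_cons_neg {p n : List Char} (ps : List (List Char)) (h : ¬ p <+: n) :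
    pyAGo (p :: ps) n = pyAGo ps n := by
  have hb : PySem.Chars.startswith n p = false := by
    rw [← Bool.not_eq_true, PySem.Chars.startswith_iff]; exact h
  simp [pyAGo, hb]

theorem pyAGo_cons_pos {p n : List Char} (ps : List (List Char)) (h : p <+: n) :
    pyAGo (p :: ps) n = PySem.Chars.stripChars (List.drop p.length n) " .!?".toList := by
  have hb : PySem.Chars.startswith n p = true := (PySem.Chars.startswith_iff n p).mpr h
  simp [pyAGo, hb]

theorem pyAGo_no_match {n : List Char} (ps : List (List Char)) (h : ∀ p ∈ ps, ¬ p <+: n) :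
    pyAGo ps n = PySem.Chars.stripChars n " .!?".toList := by
  induction ps with
  | nil => simp [pyAGo]
  | cons p ps ih =>
      rw [pyAGo_cons_neg ps (h p (List.mem_cons_self ..))]
      exact ih fun q hq => h q (List.mem_cons_of_mem _ hq)

theorem pyAGo_skip {n : List Char} (ps more : List (List Char)) (h : ∀ p ∈ ps, ¬ p <+: n) :
    pyAGo (ps ++ more) n = pyAGo more n := by
  induction ps with
  | nil => simp
  | cons p ps ih =>
      rw [List.cons_append, pyAGo_cons_neg _ (h p (List.mem_cons_self ..))]
      exact ih fun q hq => h q (List.mem_cons_of_mem _ hq)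

theorem skip_block {w t : List Char} {R : List (List Char)} (tails : List (List Char))
    (hw : ' ' ∉ w) (ht : ' ' ∉ t) (hR : R ≠ []) (hne : t ≠ w) :
    ∀ p ∈ tails.map (fun p => w ++ ' ' :: p), ¬ p <+: PySem.Chars.join [' '] (t :: R) := by
  intro p hp
  obtain ⟨q, -, rfl⟩ := List.mem_map.mp hp
  rw [sw_cons hw ht hR]
  rintro ⟨h, -⟩
  exact hne h.symm

theorem word_prefix_join {v p r : List Char} {rs : List (List Char)} (hv : ' ' ∉ v)
    (hr : ' ' ∉ r) :
    ((v ++ ' ' :: p) <+: PySem.Chars.join [' '] (r :: rs)) ↔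
      (v = r ∧ rs ≠ [] ∧ p <+: PySem.Chars.join [' '] rs) := by
  cases rs with
  | nil =>
    rw [j_single]
    constructor
    · intro h; exact absurd h (no_space_prefix (by simp) hr)
    · rintro ⟨-, h, -⟩; exact absurd rfl h
  | cons x xs =>
    rw [sw_cons hv hr (by simp)]
    simp

theorem artEval (w : List Char) (R more : List (List Char)) (hw : ' ' ∉ w) (hR : R ≠ [])
    (htok : ∀ u ∈ R, u ≠ [] ∧ ' ' ∉ u) :
    pyAGo (artTails.map (fun p => w ++ ' ' :: p) ++ more) (PySem.Chars.join [' '] (w :: R)) =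
      PySem.Chars.stripChars (PySem.Chars.join [' '] (stepArt R)) " .!?".toList := by
  cases R with
  | nil => exact absurd rfl hR
  | cons r1 rest2 =>
    have hr1 : ' ' ∉ r1 := (htok r1 (by simp)).2
    simp only [artTails, List.map_cons, List.map_nil, List.cons_append, List.nil_append]
    have e1 : ((w ++ ' ' :: "an ".toList) <+: PySem.Chars.join [' '] (w :: r1 :: rest2)) ↔
        ("an".toList = r1 ∧ rest2 ≠ []) := by
      rw [word_prefix_join hw hw, show "an ".toList = "an".toList ++ ' ' :: [] by decide,
        word_prefix_join (by decide) hr1]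
      simp
    have e2 : ((w ++ ' ' :: "a ".toList) <+: PySem.Chars.join [' '] (w :: r1 :: rest2)) ↔
        ("a".toList = r1 ∧ rest2 ≠ []) := by
      rw [word_prefix_join hw hw, show "a ".toList = "a".toList ++ ' ' :: [] by decide,
        word_prefix_join (by decide) hr1]
      simp
    have e3 : (w ++ ' ' :: []) <+: PySem.Chars.join [' '] (w :: r1 :: rest2) := by
      rw [word_prefix_join hw hw]
      simp
    by_cases h1 : "an".toList = r1 ∧ rest2 ≠ []
    · obtain ⟨heq, hne⟩ := h1
      cases rest2 with
      | nil => exact absurd rfl hne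
      | cons r2 rest3 =>
        rw [pyAGo_cons_pos _ (e1.mpr ⟨heq, by simp⟩), drop_match w _ (by simp), ← heq,
          show "an ".toList = "an".toList ++ ' ' :: [] by decide, drop_match _ [] (by simp)]
        simp [stepArt]
    · rw [pyAGo_cons_neg _ (fun hc => h1 (e1.mp hc))]
      by_cases h2 : "a".toList = r1 ∧ rest2 ≠ []
      · obtain ⟨heq, hne⟩ := h2
        cases rest2 with
        | nil => exact absurd rfl hne
        | cons r2 rest3 =>
          rw [pyAGo_cons_pos _ (e2.mpr ⟨heq, by simp⟩), drop_match w _ (by simp), ← heq,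
            show "a ".toList = "a".toList ++ ' ' :: [] by decide, drop_match _ [] (by simp)]
          simp [stepArt]
      · rw [pyAGo_cons_neg _ (fun hc => h2 (e2.mp hc)), pyAGo_cons_pos _ e3,
          drop_match w [] (by simp)]
        cases rest2 with
        | nil => simp [stepArt]
        | cons r2 rest3 =>
          simp only [stepArt]
          rw [if_neg (by rintro (h | h) <;> simp_all)]
          simp

theorem meEval (w r1 : List Char) (rest2 more : List (List Char)) (hw : ' ' ∉ w)
    (htok : ∀ u ∈ r1 :: rest2, u ≠ [] ∧ ' ' ∉ u) :
    pyAGo (meTails.map (fun p => w ++ ' ' :: p) ++ more)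
        (PySem.Chars.join [' '] (w :: r1 :: rest2)) =
      PySem.Chars.stripChars (PySem.Chars.join [' '] (stepArt (stepMe (r1 :: rest2))))
        " .!?".toList := by
  have hr1 : ' ' ∉ r1 := (htok r1 (by simp)).2
  simp only [meTails, List.map_cons, List.cons_append,
    List.nil_append]
  by_cases hme : "me".toList = r1 ∧ rest2 ≠ []
  · obtain ⟨hmeq, hne⟩ := hme
    cases rest2 with
    | nil => exact absurd rfl hne
    | cons r2 rest3 =>
      have hr2 : ' ' ∉ r2 := (htok r2 (by simp)).2
      have hsm : stepMe (r1 :: r2 :: rest3) = r2 :: rest3 := by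
        simp only [stepMe]
        rw [if_pos hmeq.symm]
      have e1 : ((w ++ ' ' :: "me an ".toList) <+:
          PySem.Chars.join [' '] (w :: r1 :: r2 :: rest3)) ↔
          ("an".toList = r2 ∧ rest3 ≠ []) := by
        rw [word_prefix_join hw hw,
          show "me an ".toList = "me".toList ++ ' ' :: "an ".toList by decide,
          word_prefix_join (by decide) hr1,
          show "an ".toList = "an".toList ++ ' ' :: [] by decide,
          word_prefix_join (by decide) hr2]
        simp [hmeq]
      have e2 : ((w ++ ' ' :: "me a ".toList) <+:
          PySem.Chars.join [' '] (w :: r1 :: r2 :: rest3)) ↔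
          ("a".toList = r2 ∧ rest3 ≠ []) := by
        rw [word_prefix_join hw hw,
          show "me a ".toList = "me".toList ++ ' ' :: "a ".toList by decide,
          word_prefix_join (by decide) hr1,
          show "a ".toList = "a".toList ++ ' ' :: [] by decide,
          word_prefix_join (by decide) hr2]
        simp [hmeq]
      have e3 : (w ++ ' ' :: "me ".toList) <+:
          PySem.Chars.join [' '] (w :: r1 :: r2 :: rest3) := by
        rw [word_prefix_join hw hw,
          show "me ".toList = "me".toList ++ ' ' :: [] by decide,
          word_prefix_join (by decide) hr1]
        simp [hmeq]
      by_cases h1 : "an".toList = r2 ∧ rest3 ≠ []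
      · obtain ⟨heq, hne3⟩ := h1
        cases rest3 with
        | nil => exact absurd rfl hne3
        | cons r3 rest4 =>
          rw [pyAGo_cons_pos _ (e1.mpr ⟨heq, by simp⟩), drop_match w _ (by simp),
            show "me an ".toList = "me".toList ++ ' ' :: "an ".toList by decide, hmeq,
            drop_match _ _ (by simp),
            show "an ".toList = "an".toList ++ ' ' :: [] by decide, heq,
            drop_match _ [] (by simp), hsm]
          simp only [stepArt]
          rw [if_pos (Or.inr heq.symm)]
          simp
      · rw [pyAGo_cons_neg _ (fun hc => h1 (e1.mp hc))]
        by_cases h2 : "a".toList = r2 ∧ rest3 ≠ []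
        · obtain ⟨heq, hne3⟩ := h2
          cases rest3 with
          | nil => exact absurd rfl hne3
          | cons r3 rest4 =>
            rw [pyAGo_cons_pos _ (e2.mpr ⟨heq, by simp⟩), drop_match w _ (by simp),
              show "me a ".toList = "me".toList ++ ' ' :: "a ".toList by decide, hmeq,
              drop_match _ _ (by simp),
              show "a ".toList = "a".toList ++ ' ' :: [] by decide, heq,
              drop_match _ [] (by simp), hsm]
            simp only [stepArt]
            rw [if_pos (Or.inl heq.symm)]
            simp
        · rw [pyAGo_cons_neg _ (fun hc => h2 (e2.mp hc)), pyAGo_cons_pos _ e3,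
            drop_match w _ (by simp),
            show "me ".toList = "me".toList ++ ' ' :: [] by decide, hmeq,
            drop_match _ [] (by simp), hsm]
          cases rest3 with
          | nil => simp [stepArt]
          | cons r3 rest4 =>
            simp only [stepArt]
            rw [if_neg (by rintro (h | h); exact h2 ⟨h.symm, by simp⟩; exact h1 ⟨h.symm, by simp⟩)]
            simp
  · have hsm : stepMe (r1 :: rest2) = r1 :: rest2 := by
      cases rest2 with
      | nil => rfl
      | cons r2 rest3 =>
        simp only [stepMe]
        rw [if_neg (fun hc => hme ⟨hc.symm, by simp⟩)]
    have hno : ∀ p' : List Char,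
        ¬ ((w ++ ' ' :: ("me".toList ++ ' ' :: p')) <+:
          PySem.Chars.join [' '] (w :: r1 :: rest2)) := by
      intro p' hc
      rw [word_prefix_join hw hw, word_prefix_join (by decide) hr1] at hc
      exact hme ⟨hc.2.2.1, hc.2.2.2.1⟩
    rw [pyAGo_cons_neg _ (by
        rw [show "me an ".toList = "me".toList ++ ' ' :: "an ".toList by decide]
        exact hno _),
      pyAGo_cons_neg _ (by
        rw [show "me a ".toList = "me".toList ++ ' ' :: "a ".toList by decide]
        exact hno _),
      pyAGo_cons_neg _ (by
        rw [show "me ".toList = "me".toList ++ ' ' :: [] by decide]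
        exact hno _),
      hsm]
    exact artEval w (r1 :: rest2) more hw (by simp) htok

theorem aEval (ts : List (List Char)) (htok : ∀ u ∈ ts, u ≠ [] ∧ ' ' ∉ u) :
    pyAGo pyStarters (PySem.Chars.join [' '] ts) =
      PySem.Chars.stripChars (PySem.Chars.join [' '] (bDrop ts)) " .!?".toList := by
  cases ts with
  | nil => decide
  | cons t rest =>
    have ht : ' ' ∉ t := (htok t (by simp)).2
    have htok' : ∀ u ∈ rest, u ≠ [] ∧ ' ' ∉ u := fun u hu => htok u (List.mem_cons_of_mem _ hu)
    cases rest with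
    | nil =>
      rw [j_single, pyAGo_no_match _ (fun p hp =>
        no_space_prefix ((by decide : ∀ q ∈ pyStarters, ' ' ∈ q) p hp) ht)]
      simp [bDrop]
    | cons r rest2 =>
      have hR : (r :: rest2 : List (List Char)) ≠ [] := by simp
      rw [starters_structure]
      by_cases hd : t = "design".toList
      · subst hd
        have hb : bDrop ("design".toList :: r :: rest2) = stepArt (stepMe (r :: rest2)) := by
          simp only [bDrop]
          rw [if_pos (by decide), if_pos (by decide)]
        rw [hb]
        exact meEval "design".toList r rest2 _ (by decide) htok'
      · rw [pyAGo_skip _ _ (skip_block meTails (by decide) ht hR hd)]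
        by_cases hbd : t = "build".toList
        · subst hbd
          have hb : bDrop ("build".toList :: r :: rest2) = stepArt (stepMe (r :: rest2)) := by
            simp only [bDrop]
            rw [if_pos (by decide), if_pos (by decide)]
          rw [hb]
          exact meEval "build".toList r rest2 _ (by decide) htok'
        · rw [pyAGo_skip _ _ (skip_block meTails (by decide) ht hR hbd)]
          by_cases hi : t = "invent".toList
          · subst hi
            have hb : bDrop ("invent".toList :: r :: rest2) = stepArt (r :: rest2) := by
              simp only [bDrop]
              rw [if_pos (by decide), if_neg (by decide)]
            rw [hb]
            exact artEval "invent".toList (r :: rest2) _ (by decide) hR htok'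
          · rw [pyAGo_skip _ _ (skip_block artTails (by decide) ht hR hi)]
            by_cases hdr : t = "draft".toList
            · subst hdr
              have hb : bDrop ("draft".toList :: r :: rest2) = stepArt (r :: rest2) := by
                simp only [bDrop]
                rw [if_pos (by decide), if_neg (by decide)]
              rw [hb]
              exact artEval "draft".toList (r :: rest2) _ (by decide) hR htok'
            · rw [pyAGo_skip _ _ (skip_block artTails (by decide) ht hR hdr)]
              by_cases hp : t = "propose".toList
              · subst hp
                have hb : bDrop ("propose".toList :: r :: rest2) = stepArt (r :: rest2) := by
                  simp only [bDrop]
                  rw [if_pos (by decide), if_neg (by decide)]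
                rw [hb]
                exact artEval "propose".toList (r :: rest2) _ (by decide) hR htok'
              · rw [pyAGo_skip _ _ (skip_block artTails (by decide) ht hR hp)]
                by_cases hs : t = "sketch".toList
                · subst hs
                  have hb : bDrop ("sketch".toList :: r :: rest2) = stepArt (r :: rest2) := by
                    simp only [bDrop]
                    rw [if_pos (by decide), if_neg (by decide)]
                  rw [hb]
                  exact artEval "sketch".toList (r :: rest2) _ (by decide) hR htok'
                · rw [pyAGo_skip _ _ (skip_block artTails (by decide) ht hR hs)]
                  have hb : bDrop (t :: r :: rest2) = t :: r :: rest2 := by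
                    simp only [bDrop]
                    rw [if_neg (by simp [pyVerbs]; tauto)]
                  rw [hb, pyAGo_no_match _ (by simp)]

theorem bIdx (ts : List (List Char)) : ts.drop (pyBIndex ts) = bDrop ts := by
  cases ts with
  | nil => rfl
  | cons t rest =>
    cases rest with
    | nil => rfl
    | cons r rest2 =>
      simp only [pyBIndex]
      split_ifs with h1 h2 h3 h4
      · -- verb, me, article at index 2
        simp only [List.getD_cons_zero, List.getD_cons_succ, List.length_cons,
          List.contains_iff_mem, Bool.and_eq_true, decide_eq_true_eq, beq_iff_eq,
          List.mem_cons, List.not_mem_nil, or_false] at h2 h3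
        obtain ⟨⟨hdb, -⟩, hrme⟩ := h2
        obtain ⟨hlen3, ha⟩ := h3
        cases rest2 with
        | nil => simp at hlen3
        | cons r2 rest3 =>
          cases rest3 with
          | nil => simp at hlen3
          | cons r3 rest4 =>
            simp only [List.getD_cons_zero] at ha
            simp only [bDrop]
            rw [if_pos (show t ∈ pyVerbs by
                rcases hdb with h | h <;> subst h <;> decide), if_pos hdb]
            simp only [stepMe]
            rw [if_pos hrme]
            simp only [stepArt]
            rw [if_pos ha]
            simp
      · -- verb, me, no article
        simp only [List.getD_cons_zero, List.getD_cons_succ, List.length_cons,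
          List.contains_iff_mem, Bool.and_eq_true, decide_eq_true_eq, beq_iff_eq,
          List.mem_cons, List.not_mem_nil, or_false] at h2 h3
        obtain ⟨⟨hdb, hlen2⟩, hrme⟩ := h2
        cases rest2 with
        | nil => simp at hlen2
        | cons r2 rest3 =>
          simp only [bDrop]
          rw [if_pos (show t ∈ pyVerbs by
              rcases hdb with h | h <;> subst h <;> decide), if_pos hdb]
          simp only [stepMe]
          rw [if_pos hrme]
          cases rest3 with
          | nil => simp [stepArt]
          | cons r3 rest4 =>
            simp only [stepArt]
            rw [if_neg (by
              intro hor
              exact h3 (by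
                simp only [List.getD_cons_zero, List.length_cons]
                exact ⟨by omega, hor⟩))]
            simp
      · -- verb, no me, article at index 1
        simp only [List.getD_cons_zero, List.getD_cons_succ, List.length_cons,
          List.contains_iff_mem, Bool.and_eq_true, decide_eq_true_eq,
          List.mem_cons, List.not_mem_nil, or_false] at h1 h4
        obtain ⟨-, hv⟩ := h1
        obtain ⟨hlen2, ha⟩ := h4
        cases rest2 with
        | nil => simp at hlen2
        | cons r2 rest3 =>
          have hrnm : r ≠ "me".toList := by
            rcases ha with h | h <;> subst h <;> decide
          simp only [bDrop]
          rw [if_pos (by simpa [pyVerbs] using hv)]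
          have hsm : stepMe (r :: r2 :: rest3) = r :: r2 :: rest3 := by
            simp only [stepMe]
            rw [if_neg hrnm]
          have hsa : stepArt (r :: r2 :: rest3) = r2 :: rest3 := by
            simp only [stepArt]
            rw [if_pos ha]
          split_ifs with hdb
          · rw [hsm, hsa]; simp
          · rw [hsa]; simp
      · -- verb only
        simp only [List.getD_cons_zero, List.getD_cons_succ, List.length_cons,
          List.contains_iff_mem, Bool.and_eq_true, decide_eq_true_eq, beq_iff_eq,
          List.mem_cons, List.not_mem_nil, or_false] at h1 h2 h4
        obtain ⟨-, hv⟩ := h1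
        simp only [bDrop]
        rw [if_pos (by simpa [pyVerbs] using hv)]
        have hsa : stepArt (r :: rest2) = r :: rest2 := by
          cases rest2 with
          | nil => rfl
          | cons r2 rest3 =>
            simp only [stepArt]
            rw [if_neg (fun hc => h4 ⟨by simp only [List.length_cons]; omega, hc⟩)]
        split_ifs with hdb
        · have hsm : stepMe (r :: rest2) = r :: rest2 := by
            cases rest2 with
            | nil => rfl
            | cons r2 rest3 =>
              simp only [stepMe]
              rw [if_neg (fun hc => h2 ⟨⟨hdb, by simp only [List.length_cons]; omega⟩, hc⟩)]
          rw [hsm, hsa]; simp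
        · rw [hsa]; simp
      · -- not a verb (or single token)
        simp only [List.getD_cons_zero, List.length_cons, List.contains_iff_mem,
          Bool.and_eq_true, decide_eq_true_eq] at h1
        simp only [List.drop_zero, bDrop]
        rw [if_neg (by
          intro hv
          exact h1 ⟨by omega, by simpa [pyVerbs] using hv⟩)]

theorem ab_eq (prompt : String) : design_subject_py prompt = design_subject_py_alt prompt := by
  show String.ofList (pyAGo pyStarters (PySem.Chars.join [' ']
      (PySem.Chars.split₀ (PySem.Chars.lower (PySem.Chars.strip prompt.toList))))) = _
  rw [aEval _ (split₀_tok _)]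
  show _ = String.ofList (PySem.Chars.stripChars (PySem.Chars.join [' ']
      (List.drop (pyBIndex (PySem.Chars.split₀ (PySem.Chars.lower (PySem.Chars.strip prompt.toList))))
        (PySem.Chars.split₀ (PySem.Chars.lower (PySem.Chars.strip prompt.toList))))) " .!?".toList)
  rw [show ∀ (l : List (List Char)), List.drop (pyBIndex l) l = l.drop (pyBIndex l) from fun _ => rfl, bIdx]

-- ===== VERDICT (by name: the statement is the Claim_ definition above) =====
theorem design_subject_py_spec : Claim_equal_design_subject_py := by
  intro prompt _
  unfold Spec_design_subject_py
  exact ab_eq prompt
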